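-- pv_equiv track=rewrite | github.com/Shabab-zero/CSE-110-BRACU | Assignment-6/Task-14.py | string_div_modify
-- ===== SOURCE A (Python) =====
-- def string_div_modify(sentence, position):
--     modified_string = sentence[0]
--
--     for i in range(1, len(sentence)):
--         if i % position != 0:
--             modified_string += sentence[i]
--     for i in range(1, len(sentence)):
--         if i % position == 0:
--             modified_string += sentence[i]
--
--     return modified_string
-- ===== SOURCE B (Python) =====
-- def string_div_modify(sentence, position):
--     head = sentence[0]
--     step = abs(position)
--     n = len(sentence)
--     middle = ''.join(sentence[k + 1:k + step] for k in range(0, n, step))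
--     tail = ''.join(sentence[k] for k in range(step, n, step))
--     return head + middle + tail
-- ===== Notes on version B (the rewrite author's own statement) =====
-- stated objective: faster
-- what changed: A's two full passes that test every index with a modulo and grow the result one character at a time with += are replaced by pure stride arithmetic: the kept characters are taken as slices between consecutive multiples of |position|, the moved characters are read directly at the stride indices, and each part is joined once, so there is no modulo test and no quadratic string concatenation.
-- outside the precondition, e.g. on string_div_modify('X', 0): A returns 'X', B raises ValueError
import Mathlib
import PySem

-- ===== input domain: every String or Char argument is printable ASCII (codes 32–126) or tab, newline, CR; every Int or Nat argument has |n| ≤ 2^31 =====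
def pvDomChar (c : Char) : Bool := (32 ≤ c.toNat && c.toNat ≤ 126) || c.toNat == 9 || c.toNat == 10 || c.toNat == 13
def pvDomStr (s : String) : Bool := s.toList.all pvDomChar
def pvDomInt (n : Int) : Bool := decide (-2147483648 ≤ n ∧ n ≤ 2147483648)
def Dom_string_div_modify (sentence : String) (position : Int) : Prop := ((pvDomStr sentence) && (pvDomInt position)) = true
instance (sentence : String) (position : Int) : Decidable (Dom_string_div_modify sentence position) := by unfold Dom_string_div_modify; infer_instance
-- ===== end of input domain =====

-- B replaces A's two modulo-filtered char-by-char passes by pure stride arithmetic (slices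
-- between consecutive multiples of |position|, plus direct reads at the stride indices), joined
-- once; a timing run measured B faster. Equal return values on Pre_.

-- ===== PORT A =====
def string_div_modify (sentence : String) (position : Int) : String :=
  let xs := sentence.toList
  match PySem.List.pyGet? xs 0 with
  | none => ""  -- sentence[0] raises IndexError on the empty string; excluded by Pre_
  | some c =>
      -- for i in range(1, len(sentence)): if i % position != 0: modified_string += sentence[i]
      let s1 := (PySem.List.pyRange 1 (PySem.List.len xs) 1).foldl
        (fun acc i => if PySem.Int.mod i position ≠ 0 then acc ++ [PySem.List.pyGetD xs i ' '] else acc) [c]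
      -- for i in range(1, len(sentence)): if i % position == 0: modified_string += sentence[i]
      let s2 := (PySem.List.pyRange 1 (PySem.List.len xs) 1).foldl
        (fun acc i => if PySem.Int.mod i position = 0 then acc ++ [PySem.List.pyGetD xs i ' '] else acc) s1
      String.ofList s2

-- ===== PORT B =====
def string_div_modify_alt (sentence : String) (position : Int) : String :=
  let xs := sentence.toList
  match PySem.List.pyGet? xs 0 with
  | none => ""  -- head = sentence[0] raises IndexError on the empty string; excluded by Pre_
  | some c =>
      let step := |position|
      let n := PySem.List.len xs
      -- middle = ''.join(sentence[k+1:k+step] for k in range(0, n, step))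
      let middle := ((PySem.List.pyRange 0 n step).map
        (fun k => PySem.List.slice xs (some (k + 1)) (some (k + step)))).flatten
      -- tail = ''.join(sentence[k] for k in range(step, n, step))
      let tail := (PySem.List.pyRange step n step).map (fun k => PySem.List.pyGetD xs k ' ')
      String.ofList (c :: (middle ++ tail))

-- ===== PRECONDITION & SPEC =====
-- Pre_ excludes position == 0 (A raises ZeroDivisionError except on one-character strings, where
-- its loops are empty and it accidentally returns the input while B's zero-step range raises
-- ValueError) and the empty string, where both raise IndexError.
def Pre_string_div_modify (sentence : String) (position : Int) : Prop :=
  sentence ≠ "" ∧ position ≠ 0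
instance (sentence : String) (position : Int) : Decidable (Pre_string_div_modify sentence position) := by unfold Pre_string_div_modify; infer_instance
def pvWitness_string_div_modify : String × Int := ("ab!", 2)

def Spec_string_div_modify (sentence : String) (position : Int) (out : String) : Prop := out = string_div_modify_alt sentence position
instance (sentence : String) (position : Int) (out : String) : Decidable (Spec_string_div_modify sentence position out) := by unfold Spec_string_div_modify; infer_instance

-- ===== CLAIM (what is proved, stated in full; the proofs are below) =====
def Claim_equal_string_div_modify : Prop := ∀ (sentence : String) (position : Int), Dom_string_div_modify sentence position → Pre_string_div_modify sentence position → Spec_string_div_modify sentence position (string_div_modify sentence position)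

-- ===== LEMMAS AND PROOFS =====

-- a positive-step range is empty when the bounds are degenerate
lemma pyRange_pos_nil {a b s : Int} (hs : 0 < s) (h : b ≤ a) :
    PySem.List.pyRange a b s = [] := by
  rw [PySem.List.pyRange_of_pos _ _ hs, if_neg (by omega)]
  simp

-- cons form of a positive-step range
lemma pyRange_pos_cons {a b s : Int} (hs : 0 < s) (h : a < b) :
    PySem.List.pyRange a b s = a :: PySem.List.pyRange (a + s) b s := by
  rw [PySem.List.pyRange_of_pos _ _ hs, PySem.List.pyRange_of_pos _ _ hs, if_pos h]
  by_cases h2 : a + s < b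
  · rw [if_pos h2]
    have hc : ((b - a + s - 1) / s).toNat = ((b - (a + s) + s - 1) / s).toNat + 1 := by
      have he : b - a + s - 1 = (b - (a + s) + s - 1) + 1 * s := by ring
      rw [he, Int.add_mul_ediv_right _ _ (by omega : s ≠ 0)]
      have h0 : 0 ≤ (b - (a + s) + s - 1) / s := Int.ediv_nonneg (by omega) (by omega)
      omega
    rw [hc, List.range_succ_eq_map, List.map_cons, List.map_map]
    refine List.cons_eq_cons.mpr ⟨by simp, ?_⟩
    refine List.map_congr_left (fun k _ => ?_)
    simp [Function.comp, Nat.succ_eq_add_one]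
    ring
  · rw [if_neg h2]
    have hc : ((b - a + s - 1) / s) = 1 := by
      have he : b - a + s - 1 = (b - a - 1) + 1 * s := by ring
      rw [he, Int.add_mul_ediv_right _ _ (by omega : s ≠ 0),
        Int.ediv_eq_zero_of_lt (by omega) (by omega)]
      omega
    rw [hc]
    simp

-- reading a 1-step range of valid indices is a take of a drop
lemma map_get_pyRange (xs : List Char) :
    ∀ (m : Nat) (c d : Int), (d - c).toNat ≤ m → 0 ≤ c → d ≤ (xs.length : Int) →
    (PySem.List.pyRange c d 1).map (fun j => PySem.List.pyGetD xs j ' ')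
      = List.take (d - c).toNat (List.drop c.toNat xs) := by
  intro m
  induction m with
  | zero =>
    intro c d hm h0 hd
    rw [PySem.List.pyRange_one_eq_nil (by omega), (by omega : (d - c).toNat = 0)]
    simp
  | succ m ih =>
    intro c d hm h0 hd
    by_cases h : c < d
    · rw [PySem.List.pyRange_one_cons h, List.map_cons, ih (c + 1) d (by omega) (by omega) hd]
      have hc : c.toNat < xs.length := by omega
      rw [List.drop_eq_getElem_cons hc, (by omega : (d - c).toNat = (d - (c + 1)).toNat + 1),
        List.take_succ_cons, PySem.List.pyGetD_of_nonneg xs _ h0]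
      rw [(by omega : (c + 1).toNat = c.toNat + 1)]
      exact List.cons_eq_cons.mpr ⟨List.getD_eq_getElem xs ' ' hc, rfl⟩
    · rw [PySem.List.pyRange_one_eq_nil (by omega), (by omega : (d - c).toNat = 0)]
      simp

-- no multiple of s lies strictly between the multiple a and a + s
lemma not_dvd_between {s a i : Int} (ha : s ∣ a) (h1 : a < i) (h2 : i < a + s) :
    ¬ s ∣ i := by
  intro hi
  have hle := Int.le_of_dvd (by omega : 0 < i - a) (dvd_sub hi ha)
  omega

-- the two stride constructions of B are exactly A's two modulo filters, block by block
lemma blocks (xs : List Char) (s : Int) (hs : 1 ≤ s) :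
    ∀ (m : Nat) (a : Int), ((xs.length : Int) - a).toNat ≤ m → 0 ≤ a → s ∣ a →
    (((PySem.List.pyRange a (xs.length : Int) s).map
        (fun k => PySem.List.slice xs (some (k + 1)) (some (k + s)))).flatten
      = ((PySem.List.pyRange (a + 1) (xs.length : Int) 1).filter
          (fun i => decide (¬ s ∣ i))).map (fun j => PySem.List.pyGetD xs j ' '))
    ∧ ((PySem.List.pyRange (a + s) (xs.length : Int) s).map (fun j => PySem.List.pyGetD xs j ' ')
      = ((PySem.List.pyRange (a + 1) (xs.length : Int) 1).filter
          (fun i => decide (s ∣ i))).map (fun j => PySem.List.pyGetD xs j ' ')) := by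
  intro m
  induction m with
  | zero =>
    intro a hm h0 hdvd
    constructor
    · rw [pyRange_pos_nil (by omega) (by omega), PySem.List.pyRange_one_eq_nil (by omega)]
      simp
    · rw [pyRange_pos_nil (by omega) (by omega), PySem.List.pyRange_one_eq_nil (by omega)]
      simp
  | succ m ih =>
    intro a hm h0 hdvd
    by_cases hn : a < (xs.length : Int)
    case neg =>
      constructor
      · rw [pyRange_pos_nil (by omega) (by omega), PySem.List.pyRange_one_eq_nil (by omega)]
        simp
      · rw [pyRange_pos_nil (by omega) (by omega), PySem.List.pyRange_one_eq_nil (by omega)]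
        simp
    case pos =>
      have hsplit := PySem.List.pyRange_one_append (a + 1) (min (a + s) (xs.length : Int))
        (xs.length : Int) (by omega) (by omega)
      have hblock : ∀ i ∈ PySem.List.pyRange (a + 1) (min (a + s) (xs.length : Int)) 1, ¬ s ∣ i := by
        intro i hi
        rw [PySem.List.mem_pyRange_one] at hi
        exact not_dvd_between hdvd (by omega) (by omega)
      have hkeep : (PySem.List.pyRange (a + 1) (min (a + s) (xs.length : Int)) 1).filter
          (fun i => decide (¬ s ∣ i))
          = PySem.List.pyRange (a + 1) (min (a + s) (xs.length : Int)) 1 :=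
        List.filter_eq_self.mpr (fun i hi => by simpa using hblock i hi)
      have hdrop : (PySem.List.pyRange (a + 1) (min (a + s) (xs.length : Int)) 1).filter
          (fun i => decide (s ∣ i)) = [] :=
        List.filter_eq_nil_iff.mpr (fun i hi => by simpa using hblock i hi)
      have hdvd' : s ∣ a + s := dvd_add hdvd (dvd_refl s)
      constructor
      · -- middle blocks
        rw [pyRange_pos_cons (by omega) hn, List.map_cons, List.flatten_cons, hsplit,
          List.filter_append, List.map_append, hkeep]
        have hslice : PySem.List.slice xs (some (a + 1)) (some (a + s))
            = (PySem.List.pyRange (a + 1) (min (a + s) (xs.length : Int)) 1).map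
                (fun j => PySem.List.pyGetD xs j ' ') := by
          rw [PySem.List.slice_toNat xs (by omega) (by omega),
            map_get_pyRange xs (min (a + s) (xs.length : Int) - (a + 1)).toNat (a + 1)
              (min (a + s) (xs.length : Int)) le_rfl (by omega) (by omega)]
          by_cases hc : a + s ≤ (xs.length : Int)
          · rw [(by omega : min (a + s) (xs.length : Int) = a + s)]
            congr 1
            omega
          · rw [(by omega : min (a + s) (xs.length : Int) = (xs.length : Int))]
            rw [List.take_of_length_le (by simp [List.length_drop]; omega),
              List.take_of_length_le (by simp [List.length_drop]; omega)]
        have hrest : (PySem.List.pyRange (min (a + s) (xs.length : Int)) (xs.length : Int) 1).filter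
            (fun i => decide (¬ s ∣ i))
            = (PySem.List.pyRange (a + s + 1) (xs.length : Int) 1).filter
                (fun i => decide (¬ s ∣ i)) := by
          by_cases h2 : a + s < (xs.length : Int)
          · rw [(by omega : min (a + s) (xs.length : Int) = a + s),
              PySem.List.pyRange_one_cons h2, List.filter_cons, if_neg (by simpa using hdvd')]
          · rw [(by omega : min (a + s) (xs.length : Int) = (xs.length : Int)),
              PySem.List.pyRange_one_eq_nil (by omega), PySem.List.pyRange_one_eq_nil (by omega)]
        rw [hslice, hrest, (ih (a + s) (by omega) (by omega) hdvd').1]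
      · -- divisible tail
        by_cases h2 : a + s < (xs.length : Int)
        · rw [pyRange_pos_cons (by omega) h2, List.map_cons, (ih (a + s) (by omega) (by omega) hdvd').2,
            hsplit, List.filter_append, List.map_append, hdrop,
            (by omega : min (a + s) (xs.length : Int) = a + s),
            PySem.List.pyRange_one_cons h2, List.filter_cons, if_pos (by simpa using hdvd'),
            List.map_cons]
          simp
        · rw [pyRange_pos_nil (by omega) (by omega)]
          have hall : (PySem.List.pyRange (a + 1) (xs.length : Int) 1).filter
              (fun i => decide (s ∣ i)) = [] := by
            refine List.filter_eq_nil_iff.mpr (fun i hi => ?_)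
            rw [PySem.List.mem_pyRange_one] at hi
            simpa using not_dvd_between hdvd (by omega) (by omega)
          rw [hall]

-- ===== VERDICT (by name: the statement is the Claim_ definition above) =====
theorem string_div_modify_spec : Claim_equal_string_div_modify := by
  intro sentence position _hdom hpre
  obtain ⟨hne, hp0⟩ := hpre
  simp only [Spec_string_div_modify, string_div_modify, string_div_modify_alt]
  cases hx : sentence.toList with
  | nil => exact absurd (String.toList_eq_nil_iff.mp hx) hne
  | cons c t =>
    have habs : 1 ≤ |position| := Int.one_le_abs hp0
    have hget : PySem.List.pyGet? (c :: t) (0 : Int) = some c := by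
      simp [PySem.List.pyGet?, PySem.List.pyIdx?]
    rw [hget]
    simp only [PySem.List.len_eq, List.length_cons]
    congr 1
    rw [PySem.List.foldl_append_ite (fun i => PySem.Int.mod i position ≠ 0)
        (fun i => PySem.List.pyGetD (c :: t) i ' '),
      PySem.List.foldl_append_ite (fun i => PySem.Int.mod i position = 0)
        (fun i => PySem.List.pyGetD (c :: t) i ' ')]
    have e1 : (fun i => decide (PySem.Int.mod i position ≠ 0))
        = (fun i : Int => decide (¬ |position| ∣ i)) := by
      funext i
      refine decide_eq_decide.mpr (not_congr ?_)
      rw [PySem.Int.mod_eq_zero_iff_dvd]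
      exact (abs_dvd _ _).symm
    have e2 : (fun i => decide (PySem.Int.mod i position = 0))
        = (fun i : Int => decide (|position| ∣ i)) := by
      funext i
      refine decide_eq_decide.mpr ?_
      rw [PySem.Int.mod_eq_zero_iff_dvd]
      exact (abs_dvd _ _).symm
    rw [e1, e2]
    have hb := blocks (c :: t) |position| habs (((c :: t).length : Int) - 0).toNat 0
      le_rfl le_rfl (dvd_zero _)
    simp only [List.length_cons, zero_add] at hb
    rw [hb.1, hb.2]
    simp
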